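-- pv_equiv track=rewrite | github.com/JPHutchins/RaspberrySeed | template.py | sortAndCountFileTypes
-- ===== SOURCE A (Python) =====
-- from copy import deepcopy
--
-- def sortAndCountFileTypes(descriptionsAndExts, sourceDict, destDict):
-- 	"descriptionsAndExts:  {'description':[ext1, ext2, ext3, etc]}"
-- 	vanillaDict = {}
-- 	vanillaDict = deepcopy(sourceDict)
--
-- 	extsInDict = [*sourceDict]
-- 	descsInDescriptionsDict = [*descriptionsAndExts]
--
-- 	for desc in descsInDescriptionsDict:
-- 		for exts in extsInDict:
-- 			for extsQ in descriptionsAndExts[desc]: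
-- 				if extsQ == exts:
-- 					destDict.setdefault(desc, []).extend(sourceDict[exts])
-- 					del sourceDict[exts]
--
-- 	leftOver = [*sourceDict]
-- 	for exts in leftOver:
-- 		destDict.setdefault('unknown', []).extend(sourceDict[exts])
--
-- 	return(destDict, vanillaDict)
-- ===== SOURCE B (Python) =====
-- # Rewrite: one reverse index ext->first-description, one bucketing pass over sourceDict,
-- # then emit buckets in description order (unmatched last under 'unknown').
-- # Return-value equivalence only: unlike A, B does not delete matched keys from sourceDict.
-- from copy import deepcopy
--
--
-- def sortAndCountFileTypes(descriptionsAndExts, sourceDict, destDict):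
--     vanillaDict = deepcopy(sourceDict)
--
--     rev = {}
--     for desc, exts in descriptionsAndExts.items():
--         for e in exts:
--             rev.setdefault(e, desc)
--
--     buckets = {}
--     for ext, files in sourceDict.items():
--         buckets.setdefault(rev.get(ext), []).extend(files)  # None key = unmatched
--
--     for desc in descriptionsAndExts:
--         if desc in buckets:
--             destDict.setdefault(desc, []).extend(buckets[desc])
--     if None in buckets:
--         destDict.setdefault('unknown', []).extend(buckets[None])
--
--     return (destDict, vanillaDict)
-- ===== Notes on version B (the rewrite author's own statement) =====
-- stated objective: faster
-- what changed: Replaces A's triple nested loop (descriptions x source-keys x extension-list, with in-place deletion from sourceDict) by a reverse index ext->first-description built once, a single bucketing pass over sourceDict, and an emit pass in description order.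
import Mathlib
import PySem

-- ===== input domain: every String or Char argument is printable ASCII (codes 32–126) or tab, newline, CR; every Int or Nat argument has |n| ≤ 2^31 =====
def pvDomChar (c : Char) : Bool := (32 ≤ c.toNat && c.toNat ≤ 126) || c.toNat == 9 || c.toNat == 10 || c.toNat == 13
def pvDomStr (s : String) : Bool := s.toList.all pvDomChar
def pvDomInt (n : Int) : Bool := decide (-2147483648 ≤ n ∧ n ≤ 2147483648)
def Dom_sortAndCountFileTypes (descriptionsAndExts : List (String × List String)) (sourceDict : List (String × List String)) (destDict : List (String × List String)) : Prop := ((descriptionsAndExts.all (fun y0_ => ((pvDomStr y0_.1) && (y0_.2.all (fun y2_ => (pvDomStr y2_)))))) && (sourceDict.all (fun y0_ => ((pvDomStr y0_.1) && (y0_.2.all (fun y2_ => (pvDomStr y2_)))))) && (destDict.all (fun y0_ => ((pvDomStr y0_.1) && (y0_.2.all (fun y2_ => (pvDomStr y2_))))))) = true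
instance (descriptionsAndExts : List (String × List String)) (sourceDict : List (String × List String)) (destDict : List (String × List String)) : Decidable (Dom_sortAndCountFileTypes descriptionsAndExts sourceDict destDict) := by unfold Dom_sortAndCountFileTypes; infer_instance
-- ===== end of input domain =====

-- B replaces A's triple nested desc/source-key/extension loop (with in-place deletion) by a reverse
-- index ext -> first description plus one bucketing pass over sourceDict, emitted in description order.
-- Return-value equivalence only: A also deletes matched keys from its sourceDict argument in place, B does not.

-- shared helper: Python's  d.setdefault(k, []).extend(v)
def pvExtend (t : PySem.Dict String (List String)) (k : String) (v : List String) : PySem.Dict String (List String) :=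
  t.insert k (t.getD k [] ++ v)

-- ===== PORT A =====
-- the body of A's innermost 'if extsQ == exts:' branch:
--   destDict.setdefault(desc, []).extend(sourceDict[exts]); del sourceDict[exts]
-- (Python raises KeyError when the key is gone; that 'none' branch is excluded by Pre_)
def pvStepA (desc exts : String) (st : PySem.Dict String (List String) × PySem.Dict String (List String)) :
    PySem.Dict String (List String) × PySem.Dict String (List String) :=
  match st.1.get? exts with
  | some v => (st.1.erase exts, pvExtend st.2 desc v)
  | none => st

-- A's nested desc/exts/extsQ loops (the Python 'for desc ... for exts ... for extsQ ...')
def pvTripleLoopA (dAE : PySem.Dict String (List String)) (extsInDict : List String)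
    (st : PySem.Dict String (List String) × PySem.Dict String (List String))
    (descs : List String) : PySem.Dict String (List String) × PySem.Dict String (List String) :=
  descs.foldl (fun st desc =>
    extsInDict.foldl (fun st exts =>
      (dAE.getD desc []).foldl (fun st extsQ =>
        if extsQ == exts then pvStepA desc exts st else st) st) st) st

-- A's trailing 'for exts in leftOver: destDict.setdefault('unknown', []).extend(sourceDict[exts])'
def pvLeftOverA (src : PySem.Dict String (List String)) (dst : PySem.Dict String (List String)) :
    PySem.Dict String (List String) :=
  src.keys.foldl (fun t exts => pvExtend t "unknown" (src.getD exts [])) dst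

def sortAndCountFileTypes (descriptionsAndExts : List (String × List String)) (sourceDict : List (String × List String)) (destDict : List (String × List String)) : (List (String × List String)) × (List (String × List String)) :=
  let dAE : PySem.Dict String (List String) := PySem.Dict.mk descriptionsAndExts
  let src : PySem.Dict String (List String) := PySem.Dict.mk sourceDict
  let dst : PySem.Dict String (List String) := PySem.Dict.mk destDict
  let vanillaDict := src
  let extsInDict := src.keys
  let descsInDescriptionsDict := dAE.keys
  let st := pvTripleLoopA dAE extsInDict (src, dst) descsInDescriptionsDict
  let dstFinal := pvLeftOverA st.1 st.2
  (dstFinal.items, vanillaDict.items)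

-- ===== PORT B =====
-- B's reverse index: ext -> first description mentioning it
def pvRevB (descriptionsAndExts : List (String × List String)) : PySem.Dict String String :=
  descriptionsAndExts.foldl (fun r p => p.2.foldl (fun r e => r.setdefault e p.1) r) PySem.Dict.empty

-- B's single bucketing pass over sourceDict ((some desc | none) -> files)
def pvBucketsB (rev : PySem.Dict String String) (sourceDict : List (String × List String)) :
    PySem.Dict (Option String) (List String) :=
  sourceDict.foldl (fun b p =>
    b.insert (rev.get? p.1) (b.getD (rev.get? p.1) [] ++ p.2)) PySem.Dict.empty

-- B's emit pass in description order
def pvEmitB (buckets : PySem.Dict (Option String) (List String))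
    (descriptionsAndExts : List (String × List String))
    (dst : PySem.Dict String (List String)) : PySem.Dict String (List String) :=
  descriptionsAndExts.foldl (fun t p =>
    match buckets.get? (some p.1) with
    | some v => pvExtend t p.1 v
    | none => t) dst

-- B's trailing unmatched bucket
def pvUnknownB (buckets : PySem.Dict (Option String) (List String))
    (dst : PySem.Dict String (List String)) : PySem.Dict String (List String) :=
  match buckets.get? none with
  | some v => pvExtend dst "unknown" v
  | none => dst

def sortAndCountFileTypes_alt (descriptionsAndExts : List (String × List String)) (sourceDict : List (String × List String)) (destDict : List (String × List String)) : (List (String × List String)) × (List (String × List String)) :=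
  let vanillaDict := sourceDict
  let rev := pvRevB descriptionsAndExts
  let buckets := pvBucketsB rev sourceDict
  let dst := pvEmitB buckets descriptionsAndExts (PySem.Dict.mk destDict)
  let dst := pvUnknownB buckets dst
  (dst.items, vanillaDict)

-- ===== PRECONDITION & SPEC =====
-- Pre_ excludes (a) association lists with duplicate keys, which a real Python dict cannot carry
-- (first-match list lookup vs last-wins dict collapse is a representation corner), and (b) the inputs
-- on which A raises KeyError: a sourceDict key occurring at least twice across the description ext lists.
def Pre_sortAndCountFileTypes (descriptionsAndExts : List (String × List String)) (sourceDict : List (String × List String)) (destDict : List (String × List String)) : Prop :=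
  (descriptionsAndExts.map Prod.fst).Nodup ∧ (sourceDict.map Prod.fst).Nodup ∧ (destDict.map Prod.fst).Nodup ∧
  ∀ p ∈ sourceDict, (descriptionsAndExts.flatMap Prod.snd).count p.1 ≤ 1
instance (descriptionsAndExts : List (String × List String)) (sourceDict : List (String × List String)) (destDict : List (String × List String)) : Decidable (Pre_sortAndCountFileTypes descriptionsAndExts sourceDict destDict) := by unfold Pre_sortAndCountFileTypes; infer_instance

def pvWitness_sortAndCountFileTypes : (List (String × List String)) × (List (String × List String)) × (List (String × List String)) :=
  ([("code", ["py", "c"]), ("docs", ["md"])],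
   [("py", ["a.py"]), ("md", ["b.md"]), ("zz", ["z"])],
   [("docs", ["old"])])

def Spec_sortAndCountFileTypes (descriptionsAndExts : List (String × List String)) (sourceDict : List (String × List String)) (destDict : List (String × List String)) (out : (List (String × List String)) × (List (String × List String))) : Prop := out = sortAndCountFileTypes_alt descriptionsAndExts sourceDict destDict
instance (descriptionsAndExts : List (String × List String)) (sourceDict : List (String × List String)) (destDict : List (String × List String)) (out : (List (String × List String)) × (List (String × List String))) : Decidable (Spec_sortAndCountFileTypes descriptionsAndExts sourceDict destDict out) := by unfold Spec_sortAndCountFileTypes; infer_instance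

-- ===== CLAIM (what is proved, stated in full; the proofs are below) =====
def Claim_equal_sortAndCountFileTypes : Prop := ∀ (descriptionsAndExts : List (String × List String)) (sourceDict : List (String × List String)) (destDict : List (String × List String)), Dom_sortAndCountFileTypes descriptionsAndExts sourceDict destDict → Pre_sortAndCountFileTypes descriptionsAndExts sourceDict destDict → Spec_sortAndCountFileTypes descriptionsAndExts sourceDict destDict (sortAndCountFileTypes descriptionsAndExts sourceDict destDict)
-- ===== LEMMAS AND PROOFS =====

-- the first description whose extension list mentions e
def pvOwner (descriptionsAndExts : List (String × List String)) (e : String) : Option String :=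
  (descriptionsAndExts.find? (fun p => p.2.contains e)).map Prod.fst

-- rev lookups: inner loop over one extension list
theorem pv_rev_inner (d : String) (qs : List String) (r : PySem.Dict String String) (x : String) :
    ((qs.foldl (fun r e => r.setdefault e d) r).get? x)
      = (r.get? x).or (if qs.contains x then some d else none) := by
  induction qs generalizing r with
  | nil => simp
  | cons q qs ih =>
    simp only [List.foldl_cons, ih]
    by_cases hx : x = q
    · subst hx
      rw [PySem.Dict.get?_setdefault_self]
      cases h : r.get? x <;> simp [Option.or]
    · rw [PySem.Dict.get?_setdefault_of_ne r d hx]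
      have : (q :: qs).contains x = qs.contains x := by
        simp [hx]
      rw [this]

-- rev lookups: the whole reverse-index build
theorem pv_rev_get (F : List (String × List String)) (r : PySem.Dict String String) (x : String) :
    ((F.foldl (fun r p => p.2.foldl (fun r e => r.setdefault e p.1) r) r).get? x)
      = (r.get? x).or (pvOwner F x) := by
  induction F generalizing r with
  | nil => simp [pvOwner]
  | cons p F ih =>
    simp only [List.foldl_cons, ih, pv_rev_inner, pvOwner, List.find?_cons]
    cases hp : p.2.contains x <;> cases h : r.get? x <;> simp [Option.or]

-- grouping fold (B's bucket pass), generic in the key function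
theorem pv_group_get (f : String × List String → Option String) (k : Option String) :
    ∀ (l : List (String × List String)) (b : PySem.Dict (Option String) (List String)),
    ((l.foldl (fun b p => b.insert (f p) (b.getD (f p) [] ++ p.2)) b).get? k)
      = if l.any (fun p => f p == k) then
          some (b.getD k [] ++ (l.filter (fun p => f p == k)).flatMap Prod.snd)
        else b.get? k := by
  intro l
  induction l with
  | nil => simp
  | cons p l ih =>
    intro b
    simp only [List.foldl_cons, ih, List.any_cons, List.filter_cons]
    by_cases hk : f p = k
    · subst hk
      cases hl : l.any (fun q => f q == f p)
      · have hfil : l.filter (fun q => f q == f p) = [] := by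
          rw [List.filter_eq_nil_iff]
          exact List.any_eq_false.mp hl
        simp [hfil, PySem.Dict.get?_insert_self]
      · simp [PySem.Dict.getD_insert_self]
    · have hk0 : (f p == k) = false := by simpa using hk
      rw [PySem.Dict.getD_insert_of_ne b (b.getD (f p) [] ++ p.2) [] (Ne.symm hk),
          PySem.Dict.get?_insert_of_ne b (b.getD (f p) [] ++ p.2) (Ne.symm hk)]
      rw [hk0, Bool.false_or]
      simp

theorem pv_extend_extend (t : PySem.Dict String (List String)) (k : String) (v w : List String) :
    pvExtend (pvExtend t k v) k w = pvExtend t k (v ++ w) := by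
  unfold pvExtend
  rw [PySem.Dict.getD_insert_self, PySem.Dict.insert_insert_self, List.append_assoc]

theorem pv_fold_extend (k : String) :
    ∀ (L : List (String × List String)) (t : PySem.Dict String (List String)),
    L.foldl (fun t q => pvExtend t k q.2) t
      = if L.isEmpty then t else pvExtend t k (L.flatMap Prod.snd) := by
  intro L
  induction L with
  | nil => simp
  | cons q L ih =>
    intro t
    simp only [List.foldl_cons, ih, List.isEmpty_cons, List.flatMap_cons]
    cases hL : L.isEmpty
    · simp [pv_extend_extend]
    · have : L = [] := List.isEmpty_iff.mp hL
      subst this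
      simp

theorem pv_get?_erase_of_ne {ν : Type} (d : PySem.Dict String ν) (e x : String) (h : x ≠ e) :
    (d.erase e).get? x = d.get? x := by
  show ((d.items.filter (fun p => !(p.1 == e))).find? (fun p => p.1 == x)).map Prod.snd
        = (d.items.find? (fun p => p.1 == x)).map Prod.snd
  congr 1
  induction d.items with
  | nil => rfl
  | cons q l ih =>
    by_cases hq : q.1 = x
    · subst hq
      have : (q.1 == e) = false := by simpa using h
      simp [this]
    · have hq' : (q.1 == x) = false := by simpa using hq
      by_cases he : q.1 = e
      · have hex : (e == x) = false := by simpa using (Ne.symm h)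
        simp [he, ih, hex]
      · have he' : (q.1 == e) = false := by simpa using he
        simp [he', hq', ih]

theorem pv_get?_filter {ν : Type} (d : PySem.Dict String ν) (P : String × ν → Bool) (x : String)
    (h : ∀ q ∈ d.items, q.1 = x → P q = true) :
    (PySem.Dict.mk (d.items.filter P)).get? x = d.get? x := by
  show ((d.items.filter P).find? (fun p => p.1 == x)).map Prod.snd
        = (d.items.find? (fun p => p.1 == x)).map Prod.snd
  congr 1
  generalize hl : d.items = l
  rw [hl] at h
  clear hl
  induction l with
  | nil => rfl
  | cons q l ih =>
    have ih' := ih (fun q hq hx => h q (List.mem_cons_of_mem _ hq) hx)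
    by_cases hq : q.1 = x
    · have hP : P q = true := h q (List.mem_cons_self ..) hq
      simp [hP, hq]
    · have hq' : (q.1 == x) = false := by simpa using hq
      cases hP : P q
      · simp [hP, ih', hq']
      · simp [hP, hq', ih']

-- innermost loop of A never triggers when e is absent from qs
theorem pv_innerA_noop (d e : String) (qs : List String) (he : e ∉ qs) :
    ∀ (st : PySem.Dict String (List String) × PySem.Dict String (List String)),
    qs.foldl (fun st q => if q == e then pvStepA d e st else st) st = st := by
  induction qs with
  | nil => intro st; rfl
  | cons q qs ih =>
    intro st
    have hq : (q == e) = false := by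
      simp only [List.mem_cons, not_or] at he
      simp [Ne.symm he.1]
    simp only [List.foldl_cons, hq, if_neg Bool.false_ne_true]
    exact ih (by simp only [List.mem_cons, not_or] at he; exact he.2) st

-- innermost loop of A: at most one trigger
theorem pv_innerA (d e : String) (qs : List String) (hc : qs.count e ≤ 1) :
    ∀ (st : PySem.Dict String (List String) × PySem.Dict String (List String)),
    qs.foldl (fun st q => if q == e then pvStepA d e st else st) st
      = if qs.contains e then pvStepA d e st else st := by
  induction qs with
  | nil => intro st; simp
  | cons q qs ih =>
    intro st
    by_cases hq : q = e
    · have hq0 : (q == e) = true := by simpa using hq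
      have hq1 : (e == q) = true := by simpa using hq.symm
      have hcount : qs.count e = 0 := by
        rw [List.count_cons, hq0] at hc
        simp at hc
        omega
      have he : e ∉ qs := List.count_eq_zero.mp hcount
      simp only [List.foldl_cons, hq0]
      rw [pv_innerA_noop d e qs he]
      have hcon : (q :: qs).contains e = true := by simp [hq]
      rw [hcon]
      simp
    · have hq0 : (q == e) = false := by simpa using hq
      have hq1 : (e == q) = false := by simpa using (Ne.symm hq)
      have hc' : qs.count e ≤ 1 := by
        rw [List.count_cons] at hc
        omega
      simp only [List.foldl_cons, hq0, if_neg Bool.false_ne_true, List.contains_cons, hq1,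
        Bool.false_or]
      exact ih hc' st

-- middle loop of A over the source-key snapshot
theorem pv_middleA (qs : List String) (d : String) :
    ∀ (es : List String) (s t : PySem.Dict String (List String)),
    es.Nodup → s.keys.Nodup → (∀ e ∈ es, qs.count e ≤ 1) →
    es.foldl (fun st exts => qs.foldl (fun st extsQ => if extsQ == exts then pvStepA d exts st else st) st) (s, t)
      = (PySem.Dict.mk (s.items.filter (fun q => !(es.contains q.1 && qs.contains q.1))),
         es.foldl (fun t e => if qs.contains e then
             (match s.get? e with
              | some v => pvExtend t d v
              | none => t) else t) t) := by
  intro es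
  induction es with
  | nil =>
    intro s t _ _ _
    simp
  | cons e es ih =>
    intro s t hnd hknd hcnt
    have hnd' : es.Nodup := hnd.of_cons
    have hene : e ∉ es := (List.nodup_cons.mp hnd).1
    have hcnt' : ∀ x ∈ es, qs.count x ≤ 1 := fun x hx => hcnt x (List.mem_cons_of_mem _ hx)
    simp only [List.foldl_cons]
    rw [pv_innerA d e qs (hcnt e (List.mem_cons_self ..)) (s, t)]
    cases hqe : qs.contains e with
    | false =>
      rw [if_neg (by simp), if_neg (by simp)]
      rw [ih s t hnd' hknd hcnt']
      refine Prod.ext ?_ rfl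
      show PySem.Dict.mk _ = PySem.Dict.mk _
      congr 1
      apply List.filter_congr
      intro q _
      cases h1 : (q.1 == e) <;> cases h2 : qs.contains q.1 <;>
        simp_all
    | true =>
      rw [if_pos (by simp), if_pos (by simp)]
      cases hget : s.get? e with
      | none =>
        have hfind : s.items.find? (fun p => p.1 == e) = none := by
          have h2 : (s.items.find? (fun p => p.1 == e)).map Prod.snd = none := hget
          exact Option.map_eq_none_iff.mp h2
        have hne : ∀ q ∈ s.items, (q.1 == e) = false := by
          intro q hq
          cases h : (q.1 == e)
          · rfl
          · have := List.find?_eq_none.mp hfind q hq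
            simp [h] at this
        have hstep : pvStepA d e (s, t) = (s, t) := by simp [pvStepA, hget]
        rw [hstep, ih s t hnd' hknd hcnt']
        refine Prod.ext ?_ rfl
        show PySem.Dict.mk _ = PySem.Dict.mk _
        congr 1
        apply List.filter_congr
        intro q hq
        have hqne : ¬(q.1 = e) := by simpa using hne q hq
        simp [hqne]
      | some v =>
        have hstep : pvStepA d e (s, t) = (s.erase e, pvExtend t d v) := by
          simp [pvStepA, hget]
        rw [hstep]
        have hkeys : (s.erase e).keys.Nodup := by
          have hsub : (s.erase e).items.Sublist s.items := List.filter_sublist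
          exact (hsub.map Prod.fst).nodup hknd
        rw [ih (s.erase e) (pvExtend t d v) hnd' hkeys hcnt']
        refine Prod.ext ?_ ?_
        · show PySem.Dict.mk _ = PySem.Dict.mk _
          congr 1
          show (s.items.filter (fun p => !(p.1 == e))).filter _ = _
          rw [List.filter_filter]
          apply List.filter_congr
          intro q _
          cases h1 : (q.1 == e)
          · cases h2 : qs.contains q.1 <;> simp_all
          · have h1' : q.1 = e := by simpa using h1
            have hmem : e ∈ qs := by simpa using hqe
            simp [h1', hmem]
        · show es.foldl _ (pvExtend t d v) = es.foldl _ (pvExtend t d v)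
          apply PySem.List.foldl_congr_mem
          intro acc x hx
          have hxe : x ≠ e := fun hcon => hene (hcon ▸ hx)
          rw [pv_get?_erase_of_ne s e x hxe]

-- outer loop of A over the description pairs
theorem pv_outerA (s0 : PySem.Dict String (List String)) (hs : s0.keys.Nodup) :
    ∀ (F : List (String × List String)) (G : List String) (t : PySem.Dict String (List String)),
    (∀ e ∈ s0.keys, G.count e + ((F.flatMap Prod.snd).count e) ≤ 1) →
    F.foldl (fun st p => s0.keys.foldl (fun st exts =>
        p.2.foldl (fun st extsQ => if extsQ == exts then pvStepA p.1 exts st else st) st) st)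
      (PySem.Dict.mk (s0.items.filter (fun q => !(G.contains q.1))), t)
      = (PySem.Dict.mk (s0.items.filter (fun q => !((G ++ F.flatMap Prod.snd).contains q.1))),
         F.foldl (fun t p => s0.items.foldl (fun t q =>
             if p.2.contains q.1 then pvExtend t p.1 q.2 else t) t) t) := by
  intro F
  induction F with
  | nil =>
    intro G t _
    simp
  | cons p F ihF =>
    intro G t hcnt
    simp only [List.foldl_cons, List.flatMap_cons]
    have hkeysG : (PySem.Dict.mk (s0.items.filter (fun q => !(G.contains q.1)))).keys.Nodup := by
      have hsub : (s0.items.filter (fun q => !(G.contains q.1))).Sublist s0.items :=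
        List.filter_sublist
      exact (hsub.map Prod.fst).nodup hs
    have hc1 : ∀ e ∈ s0.keys, p.2.count e ≤ 1 := by
      intro e he
      have := hcnt e he
      rw [List.flatMap_cons, List.count_append] at this
      omega
    rw [pv_middleA p.2 p.1 s0.keys _ t hs hkeysG hc1]
    have hcomp1 : PySem.Dict.mk (((s0.items.filter (fun q => !(G.contains q.1))) : List (String × List String)).filter
          (fun q => !(s0.keys.contains q.1 && p.2.contains q.1)))
        = PySem.Dict.mk (s0.items.filter (fun q => !((G ++ p.2).contains q.1))) := by
      congr 1
      rw [List.filter_filter]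
      apply List.filter_congr
      intro q hq
      have hqk : q.1 ∈ s0.keys := List.mem_map.mpr ⟨q, hq, rfl⟩
      cases hG : G.contains q.1 <;> cases hp2 : p.2.contains q.1 <;>
        simp_all
    have hcomp2 : s0.keys.foldl (fun t e => if p.2.contains e then
          (match (PySem.Dict.mk (s0.items.filter (fun q => !(G.contains q.1)))).get? e with
           | some v => pvExtend t p.1 v
           | none => t) else t) t
        = s0.items.foldl (fun t q => if p.2.contains q.1 then pvExtend t p.1 q.2 else t) t := by
      have hkeys_eq : s0.keys = s0.items.map Prod.fst := rfl
      rw [hkeys_eq, List.foldl_map]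
      apply PySem.List.foldl_congr_mem
      intro acc q hq
      cases hc : p.2.contains q.1
      · simp
      · have hqk : q.1 ∈ s0.keys := List.mem_map.mpr ⟨q, hq, rfl⟩
        have hGq : G.contains q.1 = false := by
          have h1 := hcnt q.1 hqk
          rw [List.flatMap_cons, List.count_append] at h1
          have h2 : 1 ≤ p.2.count q.1 :=
            List.count_pos_iff.mpr (by simpa using hc)
          have h3 : G.count q.1 = 0 := by omega
          simpa using List.count_eq_zero.mp h3
        have hfilter : (PySem.Dict.mk (s0.items.filter (fun q => !(G.contains q.1)))).get? q.1
            = s0.get? q.1 := by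
          apply pv_get?_filter
          intro r _ hr1
          rw [hr1, hGq]
          rfl
        have hmem : (q.1, q.2) ∈ s0.items := by simpa using hq
        have hget : s0.get? q.1 = some q.2 := PySem.Dict.get?_of_mem_items s0 hmem hs
        rw [hfilter, hget]
    rw [hcomp1, hcomp2]
    have hcnt' : ∀ e ∈ s0.keys, (G ++ p.2).count e + ((F.flatMap Prod.snd).count e) ≤ 1 := by
      intro e he
      have := hcnt e he
      rw [List.flatMap_cons, List.count_append] at this
      rw [List.count_append]
      omega
    rw [ihF (G ++ p.2) _ hcnt', List.append_assoc]

theorem pv_one_le_count (F : List (String × List String)) (e : String) :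
    ∀ p ∈ F, p.2.contains e = true → 1 ≤ (F.flatMap Prod.snd).count e := by
  induction F with
  | nil => intro p hp; exact absurd hp (by simp)
  | cons r F ih =>
    intro p hp hpe
    rw [List.flatMap_cons, List.count_append]
    rcases List.mem_cons.mp hp with h | h
    · have hre : r.2.contains e = true := h ▸ hpe
      have : 1 ≤ r.2.count e := List.count_pos_iff.mpr (by simpa using hre)
      omega
    · have := ih p h hpe
      omega

-- the unique owner of a once-mentioned extension
theorem pv_owner_unique (F : List (String × List String)) (e : String)
    (hc : (F.flatMap Prod.snd).count e ≤ 1) :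
    ∀ p ∈ F, p.2.contains e = true → F.find? (fun p => p.2.contains e) = some p := by
  induction F with
  | nil => intro p hp; exact absurd hp (by simp)
  | cons r F ih =>
    intro p hp hpe
    rw [List.flatMap_cons, List.count_append] at hc
    cases hr : r.2.contains e with
    | true =>
      have hp_eq : p = r := by
        rcases List.mem_cons.mp hp with h | h
        · exact h
        · exfalso
          have h1 : 1 ≤ r.2.count e :=
            List.count_pos_iff.mpr (by simpa using hr)
          have h2 : 1 ≤ (F.flatMap Prod.snd).count e :=
            pv_one_le_count F e p h hpe
          omega
      rw [List.find?_cons, hr, hp_eq]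
    | false =>
      have hp' : p ∈ F := by
        rcases List.mem_cons.mp hp with h | h
        · exfalso
          rw [h] at hpe
          rw [hpe] at hr
          simp at hr
        · exact h
      rw [List.find?_cons, hr]
      exact ih (by omega) p hp' hpe

theorem pv_owner_none (F : List (String × List String)) (e : String) :
    pvOwner F e = none ↔ (F.flatMap Prod.snd).contains e = false := by
  unfold pvOwner
  rw [Option.map_eq_none_iff, List.find?_eq_none]
  constructor
  · intro h
    cases hc : (F.flatMap Prod.snd).contains e
    · rfl
    · exfalso
      have : e ∈ F.flatMap Prod.snd := by simpa using hc
      rcases List.mem_flatMap.mp this with ⟨p, hp, he⟩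
      exact h p hp (by simpa using he)
  · intro h p hp hc
    have he : e ∈ p.2 := by simpa using hc
    have : e ∈ F.flatMap Prod.snd := List.mem_flatMap.mpr ⟨p, hp, he⟩
    simp [this] at h

-- ===== VERDICT (by name: the statement is the Claim_ definition above) =====
theorem sortAndCountFileTypes_spec : Claim_equal_sortAndCountFileTypes := by
  intro dAE sD dD _ hpre
  obtain ⟨hndA, hndS, _, hcnt⟩ := hpre
  unfold Spec_sortAndCountFileTypes
  simp only [sortAndCountFileTypes, sortAndCountFileTypes_alt]
  -- notation
  have hkeysS : (PySem.Dict.mk sD).keys.Nodup := hndS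
  have hkeysA : (PySem.Dict.mk dAE).keys.Nodup := hndA
  refine Prod.ext ?_ rfl
  refine congrArg PySem.Dict.items ?_
  -- abbreviations
  have hitems : (PySem.Dict.mk sD).items = sD := rfl
  have hkeys_eq : (PySem.Dict.mk sD).keys = sD.map Prod.fst := rfl
  have hcnt' : ∀ q ∈ sD, ((dAE.flatMap Prod.snd).count q.1) ≤ 1 := hcnt
  have hcnt_keys : ∀ e ∈ (PySem.Dict.mk sD).keys, (dAE.flatMap Prod.snd).count e ≤ 1 := by
    intro e he
    rcases List.mem_map.mp he with ⟨q, hq, rfl⟩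
    exact hcnt' q hq
  -- ============ A side ============
  -- the triple loop, via pv_outerA
  have hst : pvTripleLoopA (PySem.Dict.mk dAE) (PySem.Dict.mk sD).keys
      (PySem.Dict.mk sD, PySem.Dict.mk dD) ((PySem.Dict.mk dAE).keys)
      = (PySem.Dict.mk (sD.filter (fun q => !((dAE.flatMap Prod.snd).contains q.1))),
         dAE.foldl (fun t p => sD.foldl (fun t q =>
             if p.2.contains q.1 then pvExtend t p.1 q.2 else t) t) (PySem.Dict.mk dD)) := by
    unfold pvTripleLoopA
    have h1 : (PySem.Dict.mk dAE).keys = dAE.map Prod.fst := rfl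
    rw [h1, List.foldl_map]
    rw [PySem.List.foldl_congr_mem dAE
      (fun st p => (PySem.Dict.mk sD).keys.foldl (fun st exts =>
        ((PySem.Dict.mk dAE).getD p.1 []).foldl (fun st extsQ =>
          if extsQ == exts then pvStepA p.1 exts st else st) st) st)
      (fun st p => (PySem.Dict.mk sD).keys.foldl (fun st exts =>
        p.2.foldl (fun st extsQ =>
          if extsQ == exts then pvStepA p.1 exts st else st) st) st)
      (PySem.Dict.mk sD, PySem.Dict.mk dD)
      (by
        intro acc p hp
        have hmem : (p.1, p.2) ∈ dAE := by simpa using hp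
        dsimp only
        rw [PySem.Dict.getD_of_mem_items (PySem.Dict.mk dAE) hmem hkeysA])]
    have hinit : ((PySem.Dict.mk sD : PySem.Dict String (List String)), (PySem.Dict.mk dD : PySem.Dict String (List String)))
        = (PySem.Dict.mk (((PySem.Dict.mk sD : PySem.Dict String (List String))).items.filter
            (fun q => !((([] : List String)).contains q.1))), PySem.Dict.mk dD) := by
      simp
    rw [hinit]
    rw [pv_outerA (PySem.Dict.mk sD) hkeysS dAE [] (PySem.Dict.mk dD)
      (by intro e he; simpa using hcnt_keys e he)]
    rw [List.nil_append, hitems]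
  -- the leftover loop, merged
  have hA : pvLeftOverA
      (PySem.Dict.mk (sD.filter (fun q => !((dAE.flatMap Prod.snd).contains q.1))))
      (dAE.foldl (fun t p => sD.foldl (fun t q =>
          if p.2.contains q.1 then pvExtend t p.1 q.2 else t) t) (PySem.Dict.mk dD))
      = (if (sD.filter (fun q => !((dAE.flatMap Prod.snd).contains q.1))).isEmpty then
          dAE.foldl (fun t p => sD.foldl (fun t q =>
            if p.2.contains q.1 then pvExtend t p.1 q.2 else t) t) (PySem.Dict.mk dD)
        else pvExtend (dAE.foldl (fun t p => sD.foldl (fun t q =>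
            if p.2.contains q.1 then pvExtend t p.1 q.2 else t) t) (PySem.Dict.mk dD)) "unknown"
          ((sD.filter (fun q => !((dAE.flatMap Prod.snd).contains q.1))).flatMap Prod.snd)) := by
    unfold pvLeftOverA
    have hk : (PySem.Dict.mk (sD.filter (fun q => !((dAE.flatMap Prod.snd).contains q.1)))).keys
        = (sD.filter (fun q => !((dAE.flatMap Prod.snd).contains q.1))).map Prod.fst := rfl
    have hnd : (PySem.Dict.mk (sD.filter (fun q => !((dAE.flatMap Prod.snd).contains q.1)))).keys.Nodup := by
      have hsub : (sD.filter (fun q => !((dAE.flatMap Prod.snd).contains q.1))).Sublist sD :=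
        List.filter_sublist
      exact (hsub.map Prod.fst).nodup hndS
    rw [hk, List.foldl_map]
    rw [PySem.List.foldl_congr_mem _
      _ (fun t (q : String × List String) => pvExtend t "unknown" q.2) _
      (by
        intro acc q hq
        have hmem : (q.1, q.2) ∈ (PySem.Dict.mk (sD.filter
            (fun q => !((dAE.flatMap Prod.snd).contains q.1)))).items := by simpa using hq
        dsimp only
        rw [PySem.Dict.getD_of_mem_items _ hmem hnd])]
    exact pv_fold_extend "unknown" _ _
  -- ============ B side ============
  have hrev : ∀ x, (pvRevB dAE).get? x = pvOwner dAE x := by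
    intro x
    unfold pvRevB
    rw [pv_rev_get, PySem.Dict.get?_empty, Option.none_or]
  have hbuck : ∀ k, (pvBucketsB (pvRevB dAE) sD).get? k
      = if sD.any (fun q => pvOwner dAE q.1 == k) then
          some ((sD.filter (fun q => pvOwner dAE q.1 == k)).flatMap Prod.snd)
        else none := by
    intro k
    unfold pvBucketsB
    rw [pv_group_get (fun p => (pvRevB dAE).get? p.1) k sD PySem.Dict.empty]
    simp only [hrev, PySem.Dict.get?_empty, PySem.Dict.getD_empty, List.nil_append]
  -- per-description agreement of the two emits
  have hiff : ∀ p ∈ dAE, ∀ q ∈ sD, (pvOwner dAE q.1 == some p.1) = p.2.contains q.1 := by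
    intro p hp q hq
    cases hc : p.2.contains q.1
    · cases ho : pvOwner dAE q.1 with
      | none => rfl
      | some d' =>
        unfold pvOwner at ho
        rcases Option.map_eq_some_iff.mp ho with ⟨p', hfind, hfst⟩
        have hp'mem := List.mem_of_find?_eq_some hfind
        have hp'pred := List.find?_some hfind
        by_cases hd : d' = p.1
        · have : p' = p := List.inj_on_of_nodup_map hndA hp'mem hp (by rw [hfst, hd])
          rw [this] at hp'pred
          rw [hp'pred] at hc
          simp at hc
        · simp [hd]
    · have hfind := pv_owner_unique dAE q.1 (hcnt' q hq) p hp hc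
      unfold pvOwner
      rw [hfind]
      simp
  have hemit : pvEmitB (pvBucketsB (pvRevB dAE) sD) dAE (PySem.Dict.mk dD)
      = dAE.foldl (fun t p => sD.foldl (fun t q =>
          if p.2.contains q.1 then pvExtend t p.1 q.2 else t) t) (PySem.Dict.mk dD) := by
    unfold pvEmitB
    apply PySem.List.foldl_congr_mem
    intro acc p hp
    rw [hbuck (some p.1)]
    have hfilt : sD.filter (fun q => pvOwner dAE q.1 == some p.1)
        = sD.filter (fun q => p.2.contains q.1) :=
      List.filter_congr (fun q hq => hiff p hp q hq)
    rw [hfilt]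
    rw [← List.foldl_filter]
    rw [pv_fold_extend p.1 (sD.filter (fun q => p.2.contains q.1)) acc]
    cases hfe : (sD.filter (fun q => p.2.contains q.1)).isEmpty
    · have hne : sD.filter (fun q => p.2.contains q.1) ≠ [] := by
        intro hnil; rw [hnil] at hfe; simp at hfe
      rcases List.exists_mem_of_ne_nil _ hne with ⟨x, hx⟩
      have hxs : x ∈ sD := (List.mem_filter.mp hx).1
      have hxp : p.2.contains x.1 = true := (List.mem_filter.mp hx).2
      have hany : sD.any (fun q => pvOwner dAE q.1 == some p.1) = true :=
        List.any_eq_true.mpr ⟨x, hxs, by rw [hiff p hp x hxs]; exact hxp⟩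
      rw [hany]
      simp
    · have hnil : sD.filter (fun q => p.2.contains q.1) = [] := List.isEmpty_iff.mp hfe
      have hany : sD.any (fun q => pvOwner dAE q.1 == some p.1) = false := by
        rw [List.any_eq_false]
        intro x hxs
        rw [hiff p hp x hxs]
        exact List.filter_eq_nil_iff.mp hnil x hxs
      rw [hany]
      simp
  have hiff2 : ∀ q ∈ sD, (pvOwner dAE q.1 == none) = !((dAE.flatMap Prod.snd).contains q.1) := by
    intro q _
    cases hw : (dAE.flatMap Prod.snd).contains q.1
    · rw [(pv_owner_none dAE q.1).mpr hw]
      rfl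
    · cases ho : pvOwner dAE q.1 with
      | none =>
        have := (pv_owner_none dAE q.1).mp ho
        rw [this] at hw
        simp at hw
      | some d' => rfl
  have hunk : pvUnknownB (pvBucketsB (pvRevB dAE) sD)
      (dAE.foldl (fun t p => sD.foldl (fun t q =>
          if p.2.contains q.1 then pvExtend t p.1 q.2 else t) t) (PySem.Dict.mk dD))
      = (if (sD.filter (fun q => !((dAE.flatMap Prod.snd).contains q.1))).isEmpty then
          dAE.foldl (fun t p => sD.foldl (fun t q =>
            if p.2.contains q.1 then pvExtend t p.1 q.2 else t) t) (PySem.Dict.mk dD)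
        else pvExtend (dAE.foldl (fun t p => sD.foldl (fun t q =>
            if p.2.contains q.1 then pvExtend t p.1 q.2 else t) t) (PySem.Dict.mk dD)) "unknown"
          ((sD.filter (fun q => !((dAE.flatMap Prod.snd).contains q.1))).flatMap Prod.snd)) := by
    unfold pvUnknownB
    rw [hbuck none]
    have hfilt : sD.filter (fun q => pvOwner dAE q.1 == none)
        = sD.filter (fun q => !((dAE.flatMap Prod.snd).contains q.1)) :=
      List.filter_congr hiff2
    rw [hfilt]
    cases hfe : (sD.filter (fun q => !((dAE.flatMap Prod.snd).contains q.1))).isEmpty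
    · have hne : sD.filter (fun q => !((dAE.flatMap Prod.snd).contains q.1)) ≠ [] := by
        intro hnil; rw [hnil] at hfe; simp at hfe
      rcases List.exists_mem_of_ne_nil _ hne with ⟨x, hx⟩
      have hxs : x ∈ sD := (List.mem_filter.mp hx).1
      have hany : sD.any (fun q => pvOwner dAE q.1 == none) = true :=
        List.any_eq_true.mpr ⟨x, hxs, by rw [hiff2 x hxs]; exact (List.mem_filter.mp hx).2⟩
      rw [hany]
      simp
    · have hnil := List.isEmpty_iff.mp hfe
      have hany : sD.any (fun q => pvOwner dAE q.1 == none) = false := by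
        rw [List.any_eq_false]
        intro x hxs
        rw [hiff2 x hxs]
        exact List.filter_eq_nil_iff.mp hnil x hxs
      rw [hany]
      simp
  -- ============ combine ============
  rw [hst, hemit, hunk, hA]
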